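-- pv_equiv track=rewrite | github.com/fieldjoshua/UltrAI-Core | ARCHIVE_20250606/config_cors.py | validate_origin
-- ===== SOURCE A (Python) =====
-- from typing import List
--
-- def validate_origin(origin: str, allowed_origins: List[str]) -> bool:
--     """Validate if an origin is allowed."""
--     # Direct match
--     if origin in allowed_origins:
--         return True
--
--     # Check for subdomain wildcards
--     for allowed in allowed_origins:
--         if allowed.startswith("*."):
--             domain = allowed[2:]
--             if origin.endswith(domain):
--                 return True
--
--     return False
-- ===== SOURCE B (Python) =====
-- def validate_origin(origin: str, allowed_origins: list) -> bool:
--     """Validate origin: hash the patterns once, then probe the set with the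
--     suffixes of origin whose lengths occur among the wildcard patterns."""
--     patterns = set(allowed_origins)
--     if origin in patterns:
--         return True
--     lengths = {len(p) - 2 for p in patterns if p.startswith("*.")}
--     n = len(origin)
--     return any(L <= n and "*." + origin[n - L:] in patterns for L in lengths)
-- ===== Notes on version B (the rewrite author's own statement) =====
-- stated objective: alternative
-- what changed: Instead of scanning the pattern list for a wildcard that matches, B hashes the patterns into a set once, collects the set of wildcard suffix lengths, and probes the pattern set with '*.' + the suffix of origin of each such length, inverting the traversal from patterns to candidate suffixes.
import Mathlib
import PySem

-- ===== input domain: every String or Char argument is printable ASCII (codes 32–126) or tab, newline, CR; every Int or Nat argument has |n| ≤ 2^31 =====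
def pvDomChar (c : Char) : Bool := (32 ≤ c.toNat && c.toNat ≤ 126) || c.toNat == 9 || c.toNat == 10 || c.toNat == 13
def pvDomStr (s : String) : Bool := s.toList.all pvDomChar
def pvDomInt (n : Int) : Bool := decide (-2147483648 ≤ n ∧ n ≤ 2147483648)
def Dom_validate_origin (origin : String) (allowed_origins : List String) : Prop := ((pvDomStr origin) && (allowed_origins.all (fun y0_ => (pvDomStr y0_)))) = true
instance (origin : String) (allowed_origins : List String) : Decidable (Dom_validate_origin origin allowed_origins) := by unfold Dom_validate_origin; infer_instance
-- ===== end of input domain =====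

-- B inverts the traversal: it hashes the pattern list into a set once and probes it
-- with "*." + each suffix of origin, instead of scanning the pattern list; objective: alternative.

-- ===== PORT A =====
-- the wildcard for-loop of A, with early return
def vaWildLoop (origin : String) : List String → Bool
  | [] => false
  | allowed :: rest =>
    if PySem.Str.startswith allowed "*." then
      let domain := PySem.Str.slice allowed (some 2) none
      if PySem.Str.endswith origin domain then true
      else vaWildLoop origin rest
    else vaWildLoop origin rest

def validate_origin (origin : String) (allowed_origins : List String) : Bool :=
  -- Direct match
  if allowed_origins.contains origin then true
  else
    -- Check for subdomain wildcards
    vaWildLoop origin allowed_origins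

-- ===== PORT B =====
def validate_origin_alt (origin : String) (allowed_origins : List String) : Bool :=
  let patterns := PySem.Set.ofList allowed_origins
  if PySem.Set.contains patterns origin then true
  else
    -- {len(p) - 2 for p in patterns if p.startswith("*.")}; a set comprehension over
    -- a set, consumed only by 'any' below, so the result is order-independent
    let lengths : PySem.Set Int :=
      PySem.Set.ofList ((patterns.filter (fun p => PySem.Str.startswith p "*.")).map
        (fun p => (PySem.Str.len p : Int) - 2))
    let n : Int := PySem.Str.len origin
    -- any(L <= n and "*." + origin[n - L:] in patterns for L in lengths);
    -- '"*." + origin[n-L:]' ported exactly as String.ofList of the concatenated char lists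
    lengths.any (fun L => decide (L ≤ n) && PySem.Set.contains patterns
      (String.ofList ('*' :: '.' :: (PySem.Str.slice origin (some (n - L)) none).toList)))

-- ===== PRECONDITION & SPEC =====
def Spec_validate_origin (origin : String) (allowed_origins : List String) (out : Bool) : Prop := out = validate_origin_alt origin allowed_origins
instance (origin : String) (allowed_origins : List String) (out : Bool) : Decidable (Spec_validate_origin origin allowed_origins out) := by unfold Spec_validate_origin; infer_instance

-- ===== CLAIM (what is proved, stated in full; the proofs are below) =====
def Claim_equal_validate_origin : Prop := ∀ (origin : String) (allowed_origins : List String), Dom_validate_origin origin allowed_origins → Spec_validate_origin origin allowed_origins (validate_origin origin allowed_origins)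

-- ===== LEMMAS AND PROOFS =====

def vaWild (origin allowed : String) : Bool :=
  PySem.Str.startswith allowed "*." &&
  PySem.Str.endswith origin (PySem.Str.slice allowed (some 2) none)

theorem vaWildLoop_eq_any (origin : String) (xs : List String) :
    vaWildLoop origin xs = xs.any (vaWild origin) := by
  induction xs with
  | nil => rfl
  | cons a rest ih =>
    show (if PySem.Str.startswith a "*." = true then
            (if PySem.Str.endswith origin (PySem.Str.slice a (some 2) none) = true then true
             else vaWildLoop origin rest)
          else vaWildLoop origin rest)
        = (a :: rest).any (vaWild origin)
    rw [List.any_cons]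
    unfold vaWild
    cases h1 : PySem.Str.startswith a "*." with
    | false => rw [if_neg (by simp), ih, Bool.false_and, Bool.false_or]; rfl
    | true =>
      rw [if_pos rfl, Bool.true_and]
      cases h2 : PySem.Str.endswith origin (PySem.Str.slice a (some 2) none) with
      | false => rw [if_neg (by simp), ih, Bool.false_or]; rfl
      | true => rw [if_pos rfl, Bool.true_or]

-- a pattern matches as wildcard iff it IS literally "*." followed by some suffix of origin
theorem vaWild_iff (origin a : String) :
    vaWild origin a = true ↔
      ∃ i ≤ origin.toList.length,
        a = String.ofList ('*' :: '.' :: origin.toList.drop i) := by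
  unfold vaWild
  rw [Bool.and_eq_true]
  simp only [PySem.Str.startswith_eq, PySem.Str.endswith_eq]
  rw [PySem.Chars.startswith_iff, PySem.Chars.endswith_iff]
  constructor
  · rintro ⟨⟨t, hpre⟩, hsuf⟩
    have hslice : (PySem.Str.slice a (some 2) none).toList = a.toList.drop 2 := by
      simp [pysem]
    rw [hslice] at hsuf
    obtain ⟨u, hu⟩ := hsuf
    refine ⟨u.length, by
      have hlen := congrArg List.length hu
      simp only [List.length_append] at hlen; omega, ?_⟩
    have hdrop : a.toList.drop 2 = origin.toList.drop u.length := by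
      rw [← hu]; simp
    have h2 : ("*." : String).toList = ['*', '.'] := by decide
    rw [h2] at hpre
    have : a.toList = '*' :: '.' :: a.toList.drop 2 := by
      rw [← hpre]; simp
    have ha : a.toList = '*' :: '.' :: origin.toList.drop u.length := by
      rw [this, hdrop]
    calc a = String.ofList a.toList := by simp
      _ = String.ofList ('*' :: '.' :: origin.toList.drop u.length) := by rw [ha]
  · rintro ⟨i, hi, rfl⟩
    constructor
    · refine ⟨origin.toList.drop i, ?_⟩
      have h1 : (String.ofList ('*' :: '.' :: origin.toList.drop i)).toList
          = '*' :: '.' :: origin.toList.drop i := by simp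
      have h2 : ("*." : String).toList = ['*', '.'] := by decide
      rw [h1, h2]; simp
    · have hslice : (PySem.Str.slice (String.ofList ('*' :: '.' :: origin.toList.drop i))
          (some 2) none).toList
          = ('*' :: '.' :: origin.toList.drop i).drop 2 := by
        simp [pysem]
      rw [hslice]
      exact ⟨origin.toList.take i, by simp⟩

theorem set_contains_iff (xs : List String) (y : String) :
    PySem.Set.contains (PySem.Set.ofList xs) y = true ↔ y ∈ xs :=
  Iff.trans List.contains_iff_mem (PySem.Set.mem_ofList xs y)

-- A's wildcard scan, re-expressed as a probe for each wildcard suffix length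
theorem any_wild_iff (origin : String) (xs : List String) :
    xs.any (vaWild origin) = true ↔
      ∃ L ∈ ((PySem.Set.ofList xs).filter (fun p => PySem.Str.startswith p "*.")).map
          (fun p => (PySem.Str.len p : Int) - 2),
        L ≤ (PySem.Str.len origin : Int) ∧
        PySem.Set.contains (PySem.Set.ofList xs)
          (String.ofList ('*' :: '.' ::
            (PySem.Str.slice origin (some ((PySem.Str.len origin : Int) - L)) none).toList))
          = true := by
  have hlen : origin.toList.length = origin.length := String.length_toList
  rw [List.any_eq_true]
  constructor
  · rintro ⟨a, ha, hw⟩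
    have hstart : PySem.Str.startswith a "*." = true := by
      unfold vaWild at hw; exact (Bool.and_eq_true ..).mp hw |>.1
    obtain ⟨i, hi, hae⟩ := (vaWild_iff origin a).mp hw
    have haL : a.toList = '*' :: '.' :: origin.toList.drop i := by
      rw [hae]; simp
    have halen : (PySem.Str.len a : Int) - 2 = (origin.toList.length : Int) - i := by
      rw [PySem.Str.len_eq]
      have := congrArg List.length haL
      simp only [List.length_cons, List.length_drop] at this
      omega
    refine ⟨(origin.toList.length : Int) - i, ?_, by rw [PySem.Str.len_eq]; omega, ?_⟩
    · rw [List.mem_map]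
      refine ⟨a, ?_, halen⟩
      rw [List.mem_filter]
      exact ⟨(PySem.Set.mem_ofList xs a).mpr ha, hstart⟩
    · have hsub : (PySem.Str.len origin : Int) - ((origin.toList.length : Int) - i)
          = (i : Int) := by rw [PySem.Str.len_eq]; omega
      rw [hsub]
      have hsl : (PySem.Str.slice origin (some (i : Int)) none).toList
          = origin.toList.drop i := by simp [pysem]
      rw [hsl, ← hae]
      exact (set_contains_iff xs a).mpr ha
  · rintro ⟨L, hLmem, hle, hc⟩
    -- provenance of L: it is len(p) - 2 for a wildcard pattern p, hence 0 ≤ L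
    have hL0 : 0 ≤ L := by
      rw [List.mem_map] at hLmem
      obtain ⟨p, hpmem, rfl⟩ := hLmem
      rw [List.mem_filter] at hpmem
      have hpre := (PySem.Chars.startswith_iff p.toList ("*." : String).toList).mp
        (by simpa using hpmem.2)
      have h2 : ("*." : String).toList = ['*', '.'] := by decide
      rw [h2] at hpre
      obtain ⟨t, ht⟩ := hpre
      have := congrArg List.length ht
      simp only [List.length_append, List.length_cons] at this
      rw [PySem.Str.len_eq]
      omega
    have hle' : L ≤ (origin.length : Int) := by
      have := hle; rw [PySem.Str.len_eq] at this; omega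
    have h0 : (0 : Int) ≤ (origin.length : Int) - L := by omega
    replace hc := (set_contains_iff xs _).mp hc
    have hsl : (PySem.Str.slice origin (some ((PySem.Str.len origin : Int) - L)) none).toList
        = origin.toList.drop ((PySem.Str.len origin : Int) - L).toNat := by
      simp [PySem.List.slice_from _ h0]
    rw [hsl] at hc
    refine ⟨_, hc, ?_⟩
    rw [vaWild_iff]
    refine ⟨((PySem.Str.len origin : Int) - L).toNat, ?_, rfl⟩
    rw [PySem.Str.len_eq] at hle ⊢
    omega

-- ===== VERDICT (by name: the statement is the Claim_ definition above) =====
theorem validate_origin_spec : Claim_equal_validate_origin := by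
  intro origin xs _
  unfold Spec_validate_origin validate_origin
  have halt : validate_origin_alt origin xs
      = (if (PySem.Set.ofList xs).contains origin = true then true
         else (PySem.Set.ofList ((((PySem.Set.ofList xs)).filter
               (fun p => PySem.Str.startswith p "*.")).map
               (fun p => (PySem.Str.len p : Int) - 2))).any
             (fun L => decide (L ≤ (PySem.Str.len origin : Int)) &&
               PySem.Set.contains (PySem.Set.ofList xs)
                 (String.ofList ('*' :: '.' ::
                   (PySem.Str.slice origin
                     (some ((PySem.Str.len origin : Int) - L)) none).toList)))) := rfl
  rw [halt]
  have hdirect : ((PySem.Set.ofList xs).contains origin) = xs.contains origin := by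
    rw [Bool.eq_iff_iff]
    exact Iff.trans (set_contains_iff xs origin) List.contains_iff_mem.symm
  rw [hdirect]
  by_cases h : xs.contains origin = true
  · rw [if_pos h, if_pos h]
  · rw [if_neg h, if_neg h, vaWildLoop_eq_any, Bool.eq_iff_iff, any_wild_iff origin xs,
        List.any_eq_true]
    constructor
    · rintro ⟨L, hLmem, hle, hc⟩
      refine ⟨L, (PySem.Set.mem_ofList _ L).mpr hLmem, ?_⟩
      rw [Bool.and_eq_true]
      exact ⟨decide_eq_true hle, hc⟩
    · rintro ⟨L, hLmem, hLb⟩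
      rw [Bool.and_eq_true, decide_eq_true_eq] at hLb
      exact ⟨L, (PySem.Set.mem_ofList _ L).mp hLmem, hLb.1, hLb.2⟩
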